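-- pv_equiv track=rewrite | github.com/uvc-partners/deal-finder-new | lib/io_column_mapping.py | build_valid_mapping
-- ===== SOURCE A (Python) =====
-- from typing import Dict, List, Tuple
--
-- IO_DISPLAY_MAPPING: List[Tuple[str, List[str]]] = [
--     ("Name", ["Name", "Name__c", "Account_Name_del_del__c"]),
--     ("SF Description", ["Affinity_Description__c", "Short_Description__c"]),
--     ("Country", ["Startup_Country__c", "Affinity_Location__c", "Startup_State_And_Country__c"]),
--     ("Website", ["Website__c"]),
--     ("Link to UVC IO in SF", ["Id"]),
--     ("Date of Rejection in SF", ["r_rejected_out__c", "Rejection_Email_Sent__c"]),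
--     ("Initial Impression in SF", ["Initial_Impression__c"]),
--     ("Reason for passing in SF", ["Reason_For_Passing__c"]),
--     ("Advisor in SF", ["Advisor__c"]),
--     ("SF IO Comment", ["Data_Team_Comment__c", "Fund_Comment__c"]),
--     ("Account ID", ["Account__c"]),
--     ("Last Funding Date", ["Affinity_Last_Funding_Date__c"]),
--     ("Last Funding Amount (USD)", ["Affinity_Last_Funding_Amount_USD__c"]),
--     ("Total Funding Amount (USD)", ["Affinity_Total_Funding_Amount_USD__c"]),
--     ("Top 5 Investors", ["Affinity_Investors__c"]),
-- ]
--
-- def build_valid_mapping(available_columns: List[str]) -> Dict[str, str]: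
--     """
--     Build a mapping from display name to source column for columns that exist.
--
--     Args:
--         available_columns: Column names present in the DataFrame.
--
--     Returns:
--         Dict mapping display_name -> source_column for each valid mapping.
--     """
--     avail_set = set(available_columns)
--     result: Dict[str, str] = {}
--     for display_name, candidates in IO_DISPLAY_MAPPING:
--         for candidate in candidates:
--             if candidate in avail_set:
--                 result[display_name] = candidate
--                 break
--     return result
-- ===== SOURCE B (Python) =====
-- from typing import Dict, List, Tuple
--
-- IO_DISPLAY_MAPPING: List[Tuple[str, List[str]]] = [
--     ("Name", ["Name", "Name__c", "Account_Name_del_del__c"]),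
--     ("SF Description", ["Affinity_Description__c", "Short_Description__c"]),
--     ("Country", ["Startup_Country__c", "Affinity_Location__c", "Startup_State_And_Country__c"]),
--     ("Website", ["Website__c"]),
--     ("Link to UVC IO in SF", ["Id"]),
--     ("Date of Rejection in SF", ["r_rejected_out__c", "Rejection_Email_Sent__c"]),
--     ("Initial Impression in SF", ["Initial_Impression__c"]),
--     ("Reason for passing in SF", ["Reason_For_Passing__c"]),
--     ("Advisor in SF", ["Advisor__c"]),
--     ("SF IO Comment", ["Data_Team_Comment__c", "Fund_Comment__c"]),
--     ("Account ID", ["Account__c"]),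
--     ("Last Funding Date", ["Affinity_Last_Funding_Date__c"]),
--     ("Last Funding Amount (USD)", ["Affinity_Last_Funding_Amount_USD__c"]),
--     ("Total Funding Amount (USD)", ["Affinity_Total_Funding_Amount_USD__c"]),
--     ("Top 5 Investors", ["Affinity_Investors__c"]),
-- ]
--
-- def build_valid_mapping(available_columns: List[str]) -> Dict[str, str]:
--     # Reverse index: candidate column -> (display name, rank in its candidate list).
--     index: Dict[str, Tuple[str, int]] = {}
--     for display_name, candidates in IO_DISPLAY_MAPPING:
--         rank = 0
--         for candidate in candidates:
--             index[candidate] = (display_name, rank)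
--             rank += 1
--     # One pass over the available columns, keeping the minimum-rank hit per display name.
--     best: Dict[str, Tuple[int, str]] = {}
--     for col in available_columns:
--         hit = index.get(col)
--         if hit is not None:
--             display_name, rank = hit
--             prev = best.get(display_name)
--             if prev is None or rank < prev[0]:
--                 best[display_name] = (rank, col)
--     # Emit in the mapping's order, as A's dict insertion order does.
--     return {d: best[d][1] for d, _ in IO_DISPLAY_MAPPING if d in best}
-- ===== Notes on version B (the rewrite author's own statement) =====
-- stated objective: alternative
-- what changed: Inverts the loop nesting: instead of scanning each display name's candidate list against a set of available columns, B builds a reverse index candidate->(display, rank) once, makes a single pass over available_columns keeping the minimum-rank hit per display name, and emits the result in mapping order.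
import Mathlib
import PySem

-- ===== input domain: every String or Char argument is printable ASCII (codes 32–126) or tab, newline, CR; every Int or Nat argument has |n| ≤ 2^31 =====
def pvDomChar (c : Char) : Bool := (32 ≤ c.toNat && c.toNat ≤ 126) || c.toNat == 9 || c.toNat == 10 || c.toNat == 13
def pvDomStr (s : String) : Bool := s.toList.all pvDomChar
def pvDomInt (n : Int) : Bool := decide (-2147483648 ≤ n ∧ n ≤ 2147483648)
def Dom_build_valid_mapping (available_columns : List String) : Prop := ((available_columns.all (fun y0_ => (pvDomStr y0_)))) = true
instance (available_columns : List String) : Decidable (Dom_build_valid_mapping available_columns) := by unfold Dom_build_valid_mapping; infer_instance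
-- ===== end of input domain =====

-- B replaces A's per-display scan over candidate lists by a reverse index candidate → (display, rank)
-- and a single minimum-rank pass over available_columns (objective: alternative decomposition, same cost).

def ioMapping : List (String × List String) := [
  ("Name", ["Name", "Name__c", "Account_Name_del_del__c"]),
  ("SF Description", ["Affinity_Description__c", "Short_Description__c"]),
  ("Country", ["Startup_Country__c", "Affinity_Location__c", "Startup_State_And_Country__c"]),
  ("Website", ["Website__c"]),
  ("Link to UVC IO in SF", ["Id"]),
  ("Date of Rejection in SF", ["r_rejected_out__c", "Rejection_Email_Sent__c"]),
  ("Initial Impression in SF", ["Initial_Impression__c"]),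
  ("Reason for passing in SF", ["Reason_For_Passing__c"]),
  ("Advisor in SF", ["Advisor__c"]),
  ("SF IO Comment", ["Data_Team_Comment__c", "Fund_Comment__c"]),
  ("Account ID", ["Account__c"]),
  ("Last Funding Date", ["Affinity_Last_Funding_Date__c"]),
  ("Last Funding Amount (USD)", ["Affinity_Last_Funding_Amount_USD__c"]),
  ("Total Funding Amount (USD)", ["Affinity_Total_Funding_Amount_USD__c"]),
  ("Top 5 Investors", ["Affinity_Investors__c"])]

-- ===== PORT A =====
-- A's inner 'for candidate in candidates: if candidate in avail_set: result[…] = candidate; break'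
def firstAvail (candidates : List String) (availSet : PySem.Set String) : Option String :=
  match candidates with
  | [] => none
  | c :: rest => if PySem.Set.contains availSet c then some c else firstAvail rest availSet

def build_valid_mapping (available_columns : List String) : List (String × String) :=
  (ioMapping.foldl (fun result p =>
      match firstAvail p.2 (PySem.Set.ofList available_columns) with
      | some c => result.insert p.1 c
      | none => result)
    (PySem.Dict.empty : PySem.Dict String String)).items

-- ===== PORT B =====
-- B's 'rank = 0; for candidate in candidates: index[candidate] = (display_name, rank); rank += 1'
def insertRanks (d : String) (cs : List String) (k : Int)
    (ix : PySem.Dict String (String × Int)) : PySem.Dict String (String × Int) :=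
  match cs with
  | [] => ix
  | c :: rest => insertRanks d rest (k + 1) (ix.insert c (d, k))

def revIndex : PySem.Dict String (String × Int) :=
  ioMapping.foldl (fun ix p => insertRanks p.1 p.2 0 ix) PySem.Dict.empty

-- B's per-column update: keep the minimum-rank hit per display name
def bestStep (b : PySem.Dict String (Int × String)) (col : String) :
    PySem.Dict String (Int × String) :=
  match revIndex.get? col with
  | none => b
  | some dr =>
    match b.get? dr.1 with
    | none => b.insert dr.1 (dr.2, col)
    | some rc => if dr.2 < rc.1 then b.insert dr.1 (dr.2, col) else b

def build_valid_mapping_alt (available_columns : List String) : List (String × String) :=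
  (ioMapping.foldl (fun result p =>
      match (available_columns.foldl bestStep PySem.Dict.empty).get? p.1 with
      | some rc => result.insert p.1 rc.2
      | none => result)
    (PySem.Dict.empty : PySem.Dict String String)).items

-- ===== PRECONDITION & SPEC =====
def Spec_build_valid_mapping (available_columns : List String) (out : List (String × String)) : Prop := out = build_valid_mapping_alt available_columns
instance (available_columns : List String) (out : List (String × String)) : Decidable (Spec_build_valid_mapping available_columns out) := by unfold Spec_build_valid_mapping; infer_instance

-- ===== CLAIM (what is proved, stated in full; the proofs are below) =====
def Claim_equal_build_valid_mapping : Prop := ∀ (available_columns : List String), Dom_build_valid_mapping available_columns → Spec_build_valid_mapping available_columns (build_valid_mapping available_columns)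

-- ===== LEMMAS AND PROOFS =====
-- spec of a lookup in the reverse index: first entry whose candidate list contains col
def ispec (M : List (String × List String)) (col : String) : Option (String × Int) :=
  match M with
  | [] => none
  | (d, cs) :: t => if col ∈ cs then some (d, (cs.idxOf col : Int)) else ispec t col

-- spec of B's best entry: first candidate (by rank) of cs that is in avail
def firstHit (cs : List String) (avail : List String) (k : Int) : Option (Int × String) :=
  match cs with
  | [] => none
  | c :: rest => if c ∈ avail then some (k, c) else firstHit rest avail (k + 1)

lemma firstHit_nil (cs : List String) : ∀ k, firstHit cs [] k = none := by
  induction cs with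
  | nil => intro k; rfl
  | cons c rest ih => intro k; simp [firstHit, ih]

lemma insertRanks_get? (cs : List String) (d : String) :
    ∀ (k : Int) (ix : PySem.Dict String (String × Int)) (col : String), cs.Nodup →
    (insertRanks d cs k ix).get? col =
      if col ∈ cs then some (d, k + (cs.idxOf col : Int)) else ix.get? col := by
  induction cs with
  | nil => intro k ix col _; simp [insertRanks]
  | cons c rest ih =>
    intro k ix col hnd
    rw [List.nodup_cons] at hnd
    rw [insertRanks, ih (k + 1) _ col hnd.2]
    by_cases hc : col = c
    · subst hc
      simp [hnd.1, PySem.Dict.get?_insert_self, List.idxOf_cons_self]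
    · by_cases hr : col ∈ rest
      · have : (c :: rest).idxOf col = rest.idxOf col + 1 :=
          List.idxOf_cons_ne rest (fun h => hc h.symm)
        simp only [hr, if_true, List.mem_cons, hc, false_or, this]
        congr 2
        push_cast
        ring
      · simp only [hr, if_false, List.mem_cons, hc, false_or]
        exact PySem.Dict.get?_insert_of_ne _ _ hc

lemma ispec_eq_none (M : List (String × List String)) (col : String)
    (h : col ∉ M.flatMap (·.2)) : ispec M col = none := by
  induction M with
  | nil => rfl
  | cons p t ih =>
    obtain ⟨d, cs⟩ := p
    simp only [List.flatMap_cons, List.mem_append] at h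
    push Not at h
    simp [ispec, h.1, ih h.2]

lemma ispec_none_not_mem (M : List (String × List String)) (col d : String)
    (cs : List String) (hm : (d, cs) ∈ M) (h : ispec M col = none) : col ∉ cs := by
  induction M with
  | nil => cases hm
  | cons p t ih =>
    obtain ⟨d0, cs0⟩ := p
    rw [ispec] at h
    split at h
    · exact absurd h (by simp)
    · rcases List.mem_cons.mp hm with h1 | h1
      · cases h1; assumption
      · exact ih h1 h

lemma ispec_some (M : List (String × List String)) (col d : String) (r : Int)
    (h : ispec M col = some (d, r)) :
    ∃ cs, (d, cs) ∈ M ∧ col ∈ cs ∧ r = (cs.idxOf col : Int) := by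
  induction M with
  | nil => cases h
  | cons p t ih =>
    obtain ⟨d0, cs0⟩ := p
    rw [ispec] at h
    split at h
    · rename_i hmem
      obtain ⟨h1, h2⟩ := Prod.mk.injEq .. ▸ Option.some.injEq .. ▸ h
      exact ⟨cs0, by simp [← h1], by simpa [← h1] using hmem, h2.symm⟩
    · obtain ⟨cs, h1, h2, h3⟩ := ih h
      exact ⟨cs, List.mem_cons_of_mem _ h1, h2, h3⟩

lemma foldIndex_get? (M : List (String × List String)) :
    ∀ (ix : PySem.Dict String (String × Int)) (col : String),
    (M.flatMap (·.2)).Nodup →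
    (M.foldl (fun ix p => insertRanks p.1 p.2 0 ix) ix).get? col =
      match ispec M col with
      | some dr => some dr
      | none => ix.get? col := by
  induction M with
  | nil => intro ix col _; rfl
  | cons p t ih =>
    intro ix col hn
    obtain ⟨d, cs⟩ := p
    rw [List.flatMap_cons, List.nodup_append] at hn
    obtain ⟨hcs, ht, hdisj⟩ := hn
    rw [List.foldl_cons, ih _ col ht]
    by_cases hc : col ∈ cs
    · have hnt : col ∉ t.flatMap (·.2) := fun hmem => hdisj col hc col hmem rfl
      rw [ispec_eq_none t col hnt]
      rw [insertRanks_get? cs d 0 ix col hcs]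
      simp [ispec, hc]
    · rw [ispec]
      simp only [hc, if_false]
      cases hi : ispec t col with
      | some dr => rfl
      | none =>
        rw [insertRanks_get? cs d 0 ix col hcs]
        simp [hc]

lemma mem_unique_entry (M : List (String × List String))
    (hn : (M.flatMap (·.2)).Nodup) (d₁ d₂ : String) (cs₁ cs₂ : List String)
    (h₁ : (d₁, cs₁) ∈ M) (h₂ : (d₂, cs₂) ∈ M) (c : String)
    (hc₁ : c ∈ cs₁) (hc₂ : c ∈ cs₂) : d₁ = d₂ ∧ cs₁ = cs₂ := by
  induction M with
  | nil => cases h₁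
  | cons p t ih =>
    obtain ⟨d0, cs0⟩ := p
    rw [List.flatMap_cons, List.nodup_append] at hn
    obtain ⟨hcs, ht, hdisj⟩ := hn
    rcases List.mem_cons.mp h₁ with e₁ | e₁ <;> rcases List.mem_cons.mp h₂ with e₂ | e₂
    · cases e₁; cases e₂; exact ⟨rfl, rfl⟩
    · cases e₁
      exact absurd rfl (hdisj c hc₁ c (List.mem_flatMap.mpr ⟨(d₂, cs₂), e₂, hc₂⟩))
    · cases e₂
      exact absurd rfl (hdisj c hc₂ c (List.mem_flatMap.mpr ⟨(d₁, cs₁), e₁, hc₁⟩))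
    · exact ih ht e₁ e₂

lemma entry_unique_display (M : List (String × List String))
    (hn : (M.map (·.1)).Nodup) (d : String) (cs₁ cs₂ : List String)
    (h₁ : (d, cs₁) ∈ M) (h₂ : (d, cs₂) ∈ M) : cs₁ = cs₂ := by
  induction M with
  | nil => cases h₁
  | cons p t ih =>
    obtain ⟨d0, cs0⟩ := p
    rw [List.map_cons, List.nodup_cons] at hn
    rcases List.mem_cons.mp h₁ with e₁ | e₁ <;> rcases List.mem_cons.mp h₂ with e₂ | e₂
    · cases e₁; cases e₂; rfl
    · cases e₁
      exact absurd (List.mem_map.mpr ⟨(d, cs₂), e₂, rfl⟩) hn.1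
    · cases e₂
      exact absurd (List.mem_map.mpr ⟨(d, cs₁), e₁, rfl⟩) hn.1
    · exact ih hn.2 e₁ e₂

lemma firstHit_congr (cs : List String) (D D' : List String) :
    ∀ k, (∀ c ∈ cs, c ∈ D ↔ c ∈ D') → firstHit cs D k = firstHit cs D' k := by
  induction cs with
  | nil => intro k _; rfl
  | cons c rest ih =>
    intro k h
    by_cases hc : c ∈ D
    · have hc' : c ∈ D' := (h c (List.mem_cons_self)).mp hc
      simp [firstHit, hc, hc']
    · have hc' : c ∉ D' := fun hx => hc ((h c (List.mem_cons_self)).mpr hx)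
      simp only [firstHit, hc, hc', if_false]
      exact ih (k + 1) (fun x hx => h x (List.mem_cons_of_mem _ hx))

lemma firstHit_rank_le (cs D : List String) :
    ∀ (k r : Int) (c : String), firstHit cs D k = some (r, c) → k ≤ r := by
  induction cs with
  | nil => intro k r c h; cases h
  | cons c0 rest ih =>
    intro k r c h
    rw [firstHit] at h
    split at h
    · obtain ⟨h1, _⟩ := Prod.mk.injEq .. ▸ Option.some.injEq .. ▸ h
      omega
    · have := ih (k + 1) r c h
      omega

lemma firstHit_append (cs : List String) (D : List String) (col : String) :
    ∀ k, col ∈ cs →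
    firstHit cs (D ++ [col]) k =
      match firstHit cs D k with
      | none => some (k + (cs.idxOf col : Int), col)
      | some rc => if k + (cs.idxOf col : Int) < rc.1 then some (k + (cs.idxOf col : Int), col)
                   else some rc := by
  induction cs with
  | nil => intro k h; cases h
  | cons c rest ih =>
    intro k hmem
    by_cases hc : c = col
    · subst hc
      have hin : c ∈ D ++ [c] := by simp
      rw [firstHit, if_pos hin, List.idxOf_cons_self]
      by_cases hD : c ∈ D
      · simp [firstHit, hD]
      · rw [firstHit, if_neg hD]
        cases hf : firstHit rest D (k + 1) with
        | none => simp
        | some rc =>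
          have hle := firstHit_rank_le rest D (k + 1) rc.1 rc.2 (by rwa [Prod.mk.eta])
          simp only [Nat.cast_zero, add_zero]
          rw [if_pos (by omega)]
    · have hcol : col ∈ rest := by
        rcases List.mem_cons.mp hmem with h | h
        · exact absurd h.symm hc
        · exact h
      have hidx : (c :: rest).idxOf col = rest.idxOf col + 1 := List.idxOf_cons_ne rest hc
      by_cases hD : c ∈ D
      · have hin : c ∈ D ++ [col] := by simp [hD]
        rw [firstHit, if_pos hin, firstHit, if_pos hD, hidx]
        dsimp only
        rw [if_neg (by push_cast; omega)]
      · have hin : c ∉ D ++ [col] := by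
          simp only [List.mem_append, List.mem_singleton]
          rintro (h | h)
          exacts [hD h, hc h]
        rw [firstHit, if_neg hin, firstHit, if_neg hD, ih (k + 1) hcol, hidx]
        have harith : k + 1 + (rest.idxOf col : Int) = k + ((rest.idxOf col + 1 : Nat) : Int) := by
          push_cast; ring
        cases firstHit rest D (k + 1) with
        | none => dsimp only; rw [harith]
        | some rc => dsimp only; rw [harith]

lemma ioMapping_flat_nodup : (ioMapping.flatMap (·.2)).Nodup := by decide

lemma ioMapping_displays_nodup : (ioMapping.map (·.1)).Nodup := by decide

lemma revIndex_get? (col : String) : revIndex.get? col = ispec ioMapping col := by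
  rw [revIndex, foldIndex_get? ioMapping PySem.Dict.empty col ioMapping_flat_nodup]
  cases ispec ioMapping col with
  | none => exact PySem.Dict.get?_empty col
  | some dr => rfl

lemma best_inv (avail : List String) (d : String) (cs : List String)
    (hm : (d, cs) ∈ ioMapping) :
    (avail.foldl bestStep PySem.Dict.empty).get? d = firstHit cs avail 0 := by
  induction avail using List.reverseRecOn with
  | nil =>
    rw [List.foldl_nil, firstHit_nil cs 0]
    exact PySem.Dict.get?_empty d
  | append_singleton D col ih =>
    rw [List.foldl_append, List.foldl_cons, List.foldl_nil]
    cases hx : revIndex.get? col with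
    | none =>
      have hno : ispec ioMapping col = none := by rw [← revIndex_get?, hx]
      have hcol : col ∉ cs := ispec_none_not_mem ioMapping col d cs hm hno
      rw [bestStep, hx, ih]
      exact (firstHit_congr cs (D ++ [col]) D 0 (fun c hc => by
        have : c ≠ col := fun e => hcol (e ▸ hc)
        simp [List.mem_append, this])).symm
    | some dr =>
      obtain ⟨d', r⟩ := dr
      have hsp : ispec ioMapping col = some (d', r) := by rw [← revIndex_get?, hx]
      obtain ⟨cs', hm', hcol', hr⟩ := ispec_some ioMapping col d' r hsp
      by_cases hd : d' = d
      · subst hd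
        have hcs : cs' = cs := entry_unique_display ioMapping ioMapping_displays_nodup d' cs' cs hm' hm
        subst hcs
        rw [bestStep, hx]
        dsimp only
        rw [firstHit_append cs' D col 0 hcol', ← hr]
        cases hf : (D.foldl bestStep PySem.Dict.empty).get? d' with
        | none =>
          rw [ih] at hf
          rw [hf]
          dsimp only
          simp only [zero_add]
          exact PySem.Dict.get?_insert_self _ _ _
        | some rc =>
          rw [ih] at hf
          rw [hf]
          dsimp only
          simp only [zero_add]
          by_cases hlt : r < rc.1
          · rw [if_pos hlt, if_pos hlt]
            exact PySem.Dict.get?_insert_self _ _ _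
          · rw [if_neg hlt, if_neg hlt, ← hf, ih]
      · have hcol : col ∉ cs := fun hcm =>
          hd (mem_unique_entry ioMapping ioMapping_flat_nodup d' d cs' cs hm' hm col hcol' hcm).1
        have hfh : firstHit cs (D ++ [col]) 0 = firstHit cs D 0 :=
          firstHit_congr cs (D ++ [col]) D 0 (fun c hcm => by
            have : c ≠ col := fun e => hcol (e ▸ hcm)
            simp [List.mem_append, this])
        rw [bestStep, hx, hfh, ← ih]
        dsimp only
        cases hf : (D.foldl bestStep PySem.Dict.empty).get? d' with
        | none =>
          exact PySem.Dict.get?_insert_of_ne _ _ (fun e => hd e.symm)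
        | some rc =>
          dsimp only
          by_cases hlt : r < rc.1
          · rw [if_pos hlt]
            exact PySem.Dict.get?_insert_of_ne _ _ (fun e => hd e.symm)
          · rw [if_neg hlt]

lemma firstAvail_eq (cs avail : List String) :
    ∀ k, firstAvail cs (PySem.Set.ofList avail) = Option.map Prod.snd (firstHit cs avail k) := by
  induction cs with
  | nil => intro k; rfl
  | cons c rest ih =>
    intro k
    by_cases h : c ∈ avail
    · simp [firstAvail, firstHit, h]
    · have hc : PySem.Set.contains (PySem.Set.ofList avail) c = false := by
        simp [pysem, h]
      simp only [firstAvail, firstHit, hc, h, if_false, Bool.false_eq_true]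
      exact ih (k + 1)

-- ===== VERDICT (by name: the statement is the Claim_ definition above) =====
theorem build_valid_mapping_spec : Claim_equal_build_valid_mapping := by
  intro avail _
  unfold Spec_build_valid_mapping build_valid_mapping build_valid_mapping_alt
  congr 1
  apply PySem.List.foldl_congr_mem
  intro res x hx
  obtain ⟨d, cs⟩ := x
  rw [best_inv avail d cs hx, firstAvail_eq cs avail 0]
  cases firstHit cs avail 0 with
  | none => rfl
  | some rc => rfl
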